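-- pv_equiv track=rewrite | github.com/AnLu996/Tabu_Search-Examples | horarios-tabu_search.py | contar_conflictos
-- ===== SOURCE A (Python) =====
-- def contar_conflictos(horario):
--     conflictos = 0
--     tabla = {}
--     for entrada in horario:
--         tiempo, salon, curso, profe = entrada
--         if tiempo not in tabla:
--             tabla[tiempo] = {"profesores": set(), "salones": set()}
--         if profe in tabla[tiempo]["profesores"]:
--             conflictos += 1
--         else:
--             tabla[tiempo]["profesores"].add(profe)
--         if salon in tabla[tiempo]["salones"]:
--             conflictos += 1
--         else:
--             tabla[tiempo]["salones"].add(salon)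
--     return conflictos
-- ===== SOURCE B (Python) =====
-- def contar_conflictos(horario):
--     # Build the (time, teacher) and (time, room) pair lists, then count by brute
--     # force the entries whose pair reappears later in the list (no hashing).
--     pares_profe = []
--     pares_salon = []
--     for tiempo, salon, curso, profe in horario:
--         pares_profe.append((tiempo, profe))
--         pares_salon.append((tiempo, salon))
--
--     def duplicados(pares):
--         total = 0
--         while pares:
--             primero, pares = pares[0], pares[1:]
--             if primero in pares:
--                 total += 1
--         return total
--
--     return duplicados(pares_profe) + duplicados(pares_salon)
-- ===== Notes on version B (the rewrite author's own statement) =====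
-- stated objective: alternative
-- what changed: Replaces A's single pass with incremental per-time hash sets by a hash-free two-stage method: build the (time,teacher) and (time,room) pair lists, then count by brute-force suffix scans the entries whose pair occurs again later (both counts equal length minus number of distinct pairs).
import Mathlib
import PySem

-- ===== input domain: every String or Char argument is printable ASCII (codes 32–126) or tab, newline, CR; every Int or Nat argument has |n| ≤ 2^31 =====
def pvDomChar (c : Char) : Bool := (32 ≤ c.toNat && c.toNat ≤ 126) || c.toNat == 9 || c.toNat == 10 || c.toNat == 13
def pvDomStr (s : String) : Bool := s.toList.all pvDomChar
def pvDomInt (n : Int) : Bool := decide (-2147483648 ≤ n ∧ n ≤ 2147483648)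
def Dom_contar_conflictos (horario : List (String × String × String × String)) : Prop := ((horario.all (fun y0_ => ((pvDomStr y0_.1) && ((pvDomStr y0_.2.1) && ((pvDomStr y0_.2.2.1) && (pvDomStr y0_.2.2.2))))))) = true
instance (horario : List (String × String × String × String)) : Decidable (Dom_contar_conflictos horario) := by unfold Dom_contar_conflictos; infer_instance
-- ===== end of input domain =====

-- B replaces A's single-pass incremental per-time hash sets by a hash-free two-stage method:
-- build the (time,teacher) and (time,room) pair lists, then count by brute-force suffix scans
-- the entries whose pair occurs again later; objective: alternative (no speed claim).


-- ===== PORT A =====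
-- One loop step of A: ensure tabla[tiempo] exists, then the two membership checks / set insertions.
def pvStepA (st : Int × PySem.Dict String (PySem.Set String × PySem.Set String))
    (entrada : String × String × String × String) :
    Int × PySem.Dict String (PySem.Set String × PySem.Set String) :=
  let (tiempo, salon, _curso, profe) := entrada
  let tabla := if st.2.contains tiempo then st.2 else st.2.insert tiempo ([], [])
  let rec0 := tabla.getD tiempo ([], [])
  -- "if profe in tabla[tiempo]['profesores']: conflictos += 1 else: …add(profe)"
  let st1 : Int × PySem.Dict String (PySem.Set String × PySem.Set String) :=
    if PySem.Set.contains rec0.1 profe then (st.1 + 1, tabla)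
    else (st.1, tabla.insert tiempo (PySem.Set.add rec0.1 profe, rec0.2))
  let rec1 := st1.2.getD tiempo ([], [])
  -- "if salon in tabla[tiempo]['salones']: conflictos += 1 else: …add(salon)"
  if PySem.Set.contains rec1.2 salon then (st1.1 + 1, st1.2)
  else (st1.1, st1.2.insert tiempo (rec1.1, PySem.Set.add rec1.2 salon))

def contar_conflictos (horario : List (String × String × String × String)) : Int :=
  (horario.foldl pvStepA (0, PySem.Dict.empty)).1

-- ===== PORT B =====
-- "def duplicados(pares): total = 0; while pares: primero, pares = pares[0], pares[1:];
--  if primero in pares: total += 1; return total" — the while loop consumes the list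
-- front to back, so it is the structural recursion on the list.
def pvDuplicados : List (String × String) → Int
  | [] => 0
  | primero :: pares => (if pares.contains primero then 1 else 0) + pvDuplicados pares

def contar_conflictos_alt (horario : List (String × String × String × String)) : Int :=
  -- first loop: append (tiempo, profe) / (tiempo, salon) to the two pair lists
  let pares := horario.foldl
    (fun (acc : List (String × String) × List (String × String)) e =>
      (acc.1 ++ [(e.1, e.2.2.2)], acc.2 ++ [(e.1, e.2.1)])) ([], [])
  pvDuplicados pares.1 + pvDuplicados pares.2

-- ===== PRECONDITION & SPEC =====
def Spec_contar_conflictos (horario : List (String × String × String × String)) (out : Int) : Prop := out = contar_conflictos_alt horario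
instance (horario : List (String × String × String × String)) (out : Int) : Decidable (Spec_contar_conflictos horario out) := by unfold Spec_contar_conflictos; infer_instance

-- ===== CLAIM (what is proved, stated in full; the proofs are below) =====
def Claim_equal_contar_conflictos : Prop := ∀ (horario : List (String × String × String × String)), Dom_contar_conflictos horario → Spec_contar_conflictos horario (contar_conflictos horario)

-- ===== LEMMAS AND PROOFS =====

-- Invariant relating A's table to the accumulated pair sets of B.
def pvInv (tabla : PySem.Dict String (PySem.Set String × PySem.Set String))
    (Pp Ps : PySem.Set (String × String)) : Prop :=
  ∀ t x, (((tabla.getD t ([], [])).1.contains x = true) ↔ (t, x) ∈ Pp)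
       ∧ (((tabla.getD t ([], [])).2.contains x = true) ↔ (t, x) ∈ Ps)

theorem pv_length_add {α : Type} [BEq α] [LawfulBEq α] (s : PySem.Set α) (x : α) :
    ((PySem.Set.add s x).length : Int) = s.length + (if x ∈ s then 0 else 1) := by
  by_cases h : x ∈ s <;>
    simp [PySem.Set.add, PySem.Set.contains, h, List.length_append]

-- invariant preservation: any table whose getD sends t to the two grown sets and agrees elsewhere
theorem pv_inv_step (tabla T' : PySem.Dict String (PySem.Set String × PySem.Set String))
    (Pp Ps : PySem.Set (String × String)) (t p s : String)
    (hInv : pvInv tabla Pp Ps)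
    (hgot : ∀ t', T'.getD t' ([], [])
      = if t' = t
        then (PySem.Set.add (tabla.getD t ([], [])).1 p, PySem.Set.add (tabla.getD t ([], [])).2 s)
        else tabla.getD t' ([], [])) :
    pvInv T' (PySem.Set.add Pp (t, p)) (PySem.Set.add Ps (t, s)) := by
  intro t' x
  rw [hgot]
  by_cases he : t' = t
  · subst he
    rw [if_pos rfl]
    constructor
    · simp only [PySem.Set.contains_iff, PySem.Set.mem_add, Prod.mk.injEq, true_and]
      rw [show (x ∈ (tabla.getD t' ([], [])).1 ↔ (t', x) ∈ Pp) from
        Iff.trans (PySem.Set.contains_iff _ _).symm (hInv t' x).1]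
    · simp only [PySem.Set.contains_iff, PySem.Set.mem_add, Prod.mk.injEq, true_and]
      rw [show (x ∈ (tabla.getD t' ([], [])).2 ↔ (t', x) ∈ Ps) from
        Iff.trans (PySem.Set.contains_iff _ _).symm (hInv t' x).2]
  · rw [if_neg he]
    constructor
    · simp only [PySem.Set.mem_add, Prod.mk.injEq]
      rw [show ((t', x) ∈ Pp ∨ t' = t ∧ x = p) ↔ (t', x) ∈ Pp from
        or_iff_left (fun h => he h.1)]
      exact (hInv t' x).1
    · simp only [PySem.Set.mem_add, Prod.mk.injEq]
      rw [show ((t', x) ∈ Ps ∨ t' = t ∧ x = s) ↔ (t', x) ∈ Ps from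
        or_iff_left (fun h => he h.1)]
      exact (hInv t' x).2

theorem pv_main : ∀ (l : List (String × String × String × String))
    (conf : Int) (tabla : PySem.Dict String (PySem.Set String × PySem.Set String))
    (Pp Ps : PySem.Set (String × String)), pvInv tabla Pp Ps →
    (l.foldl pvStepA (conf, tabla)).1
      = conf + 2 * l.length
        - ((PySem.Set.update Pp (l.map (fun e => (e.1, e.2.2.2)))).length - Pp.length)
        - ((PySem.Set.update Ps (l.map (fun e => (e.1, e.2.1)))).length - Ps.length) := by
  intro l
  induction l with
  | nil => intro conf tabla Pp Ps _; simp [PySem.Set.update]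
  | cons e rest ih =>
    intro conf tabla Pp Ps hInv
    obtain ⟨t, s, c, p⟩ := e
    simp only [List.foldl_cons, pvStepA]
    generalize hTT : (if (PySem.Dict.contains tabla t) = true then tabla else tabla.insert t ([], [])) = T
    have hT : ∀ t', T.getD t' ([], []) = tabla.getD t' ([], []) := by
      intro t'
      rw [← hTT]
      by_cases hc : tabla.contains t = true
      · simp [hc]
      · rw [Bool.not_eq_true] at hc
        simp only [hc, Bool.false_eq_true, if_false]
        rw [PySem.Dict.getD_insert]
        split_ifs with he
        · subst he
          rw [PySem.Dict.getD_of_not_contains _ _ hc]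
        · rfl
    have hT2 : ∀ t' v, (T.insert t v).getD t' ([], [])
        = (if t' = t then v else tabla.getD t' ([], [])) := by
      intro t' v
      rw [PySem.Dict.getD_insert]
      split_ifs with he
      · rfl
      · exact hT t'
    have hT3 : ∀ t' v w, ((T.insert t v).insert t w).getD t' ([], [])
        = (if t' = t then w else tabla.getD t' ([], [])) := by
      intro t' v w
      rw [PySem.Dict.getD_insert]
      split_ifs with he
      · rfl
      · rw [hT2, if_neg he]
    have hpm : (p ∈ (tabla.getD t ([], [])).1) ↔ (t, p) ∈ Pp := by
      rw [← (hInv t p).1, PySem.Set.contains_iff]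
    have hsm : (s ∈ (tabla.getD t ([], [])).2) ↔ (t, s) ∈ Ps := by
      rw [← (hInv t s).2, PySem.Set.contains_iff]
    have arith : ∀ (conf' : Int)
        (T' : PySem.Dict String (PySem.Set String × PySem.Set String)),
        pvInv T' (PySem.Set.add Pp (t, p)) (PySem.Set.add Ps (t, s)) →
        conf' = conf + 2 - ((PySem.Set.add Pp (t, p)).length - Pp.length)
                        - ((PySem.Set.add Ps (t, s)).length - Ps.length) →
        (rest.foldl pvStepA (conf', T')).1
          = conf + 2 * ((t, s, c, p) :: rest).length
            - ((PySem.Set.update Pp (((t, s, c, p) :: rest).map (fun e => (e.1, e.2.2.2)))).length - Pp.length)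
            - ((PySem.Set.update Ps (((t, s, c, p) :: rest).map (fun e => (e.1, e.2.1)))).length - Ps.length) := by
      intro conf' T' hInv' hconf
      rw [ih _ _ _ _ hInv', hconf]
      simp only [List.map_cons, PySem.Set.update_cons, List.length_cons]
      push_cast
      ring
    by_cases hp : (t, p) ∈ Pp
    · have hpa : PySem.Set.add (tabla.getD t ([], [])).1 p = (tabla.getD t ([], [])).1 := by
        simp [PySem.Set.add, hpm.mpr hp]
      have hPl : ((PySem.Set.add Pp (t, p)).length : Int) = Pp.length := by
        rw [pv_length_add, if_pos hp]; ring
      by_cases hs : (t, s) ∈ Ps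
      · -- both present: conf + 2, table T
        have hsa : PySem.Set.add (tabla.getD t ([], [])).2 s = (tabla.getD t ([], [])).2 := by
          simp [PySem.Set.add, hsm.mpr hs]
        have hSl : ((PySem.Set.add Ps (t, s)).length : Int) = Ps.length := by
          rw [pv_length_add, if_pos hs]; ring
        simp only [PySem.Set.contains_iff, hT, hpm, hsm, hp, hs, if_true]
        exact arith _ _ (pv_inv_step tabla T Pp Ps t p s hInv (by
          intro t'; rw [hT]; split_ifs with he
          · subst he; rw [hpa, hsa]
          · rfl)) (by rw [hPl, hSl]; ring)
      · -- profe present, salon new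
        have hSl : ((PySem.Set.add Ps (t, s)).length : Int) = Ps.length + 1 := by
          rw [pv_length_add, if_neg hs]
        simp only [PySem.Set.contains_iff, hT, hpm, hsm, hp, hs, if_true, if_false]
        exact arith _ _ (pv_inv_step tabla _ Pp Ps t p s hInv (by
          intro t'; rw [hT2]; split_ifs with he
          · subst he; rw [hpa]
          · rfl)) (by rw [hPl, hSl]; ring)
    · have hPl : ((PySem.Set.add Pp (t, p)).length : Int) = Pp.length + 1 := by
        rw [pv_length_add, if_neg hp]
      by_cases hs : (t, s) ∈ Ps
      · -- profe new, salon present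
        have hsa : PySem.Set.add (tabla.getD t ([], [])).2 s = (tabla.getD t ([], [])).2 := by
          simp [PySem.Set.add, hsm.mpr hs]
        have hSl : ((PySem.Set.add Ps (t, s)).length : Int) = Ps.length := by
          rw [pv_length_add, if_pos hs]; ring
        simp only [PySem.Set.contains_iff, hT, hT2, hpm, hsm, hp, hs, if_true, if_false]
        exact arith _ _ (pv_inv_step tabla _ Pp Ps t p s hInv (by
          intro t'; rw [hT2]; split_ifs with he
          · subst he; rw [hsa]
          · rfl)) (by rw [hPl, hSl]; ring)
      · -- both new
        have hSl : ((PySem.Set.add Ps (t, s)).length : Int) = Ps.length + 1 := by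
          rw [pv_length_add, if_neg hs]
        simp only [PySem.Set.contains_iff, hT, hT2, hpm, hsm, hp, hs, if_true, if_false]
        exact arith _ _ (pv_inv_step tabla _ Pp Ps t p s hInv
          (fun t' => hT3 t' _ _)) (by rw [hPl, hSl]; ring)

-- B-side: the pair-building fold is the two maps
theorem pv_fold_pairs : ∀ (l : List (String × String × String × String))
    (a b : List (String × String)),
    l.foldl (fun (acc : List (String × String) × List (String × String)) e =>
      (acc.1 ++ [(e.1, e.2.2.2)], acc.2 ++ [(e.1, e.2.1)])) (a, b)
    = (a ++ l.map (fun e => (e.1, e.2.2.2)), b ++ l.map (fun e => (e.1, e.2.1))) := by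
  intro l
  induction l with
  | nil => simp
  | cons e rest ih => intro a b; simp [ih]

-- the distinct-pair count as a Finset cardinality
theorem pv_ofList_len {α : Type} [DecidableEq α] [BEq α] [LawfulBEq α] (l : List α) :
    (PySem.Set.ofList l).length = l.toFinset.card := by
  have hnd := PySem.Set.nodup_ofList (α := α) l
  have hset : (PySem.Set.ofList l).toFinset = l.toFinset := by
    ext y; simp [List.mem_toFinset, PySem.Set.mem_ofList]
  rw [← List.toFinset_card_of_nodup hnd, hset]

-- brute-force suffix-scan duplicate count = length minus number of distinct elements
theorem pv_duplicados_eq : ∀ (l : List (String × String)),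
    pvDuplicados l = (l.length : Int) - l.toFinset.card := by
  intro l
  induction l with
  | nil => simp [pvDuplicados]
  | cons x xs ih =>
    have hle := List.toFinset_card_le xs
    by_cases h : x ∈ xs
    · have : (x :: xs).toFinset.card = xs.toFinset.card := by
        simp [List.toFinset_cons, Finset.insert_eq_self.mpr (List.mem_toFinset.mpr h)]
      simp only [pvDuplicados, List.contains_eq_mem, h, decide_true, if_true, ih,
        List.length_cons, this]
      push_cast; ring
    · have : (x :: xs).toFinset.card = xs.toFinset.card + 1 := by
        rw [List.toFinset_cons, Finset.card_insert_of_notMem (by simpa using h)]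
      simp only [pvDuplicados, List.contains_eq_mem, h, decide_false, ih,
        List.length_cons, this]
      push_cast; ring

theorem contar_conflictos_spec' (horario : List (String × String × String × String)) :
    contar_conflictos horario = contar_conflictos_alt horario := by
  unfold contar_conflictos contar_conflictos_alt
  have h0 : pvInv PySem.Dict.empty [] [] := by
    intro t x
    constructor <;> simp [PySem.Dict.getD_empty, PySem.Set.contains]
  rw [pv_main horario 0 PySem.Dict.empty [] [] h0, pv_fold_pairs]
  simp only [List.nil_append]
  have hu : ∀ (m : List (String × String)),
      PySem.Set.update ([] : PySem.Set (String × String)) m = PySem.Set.ofList m := by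
    intro m; rw [PySem.Set.ofList_eq_foldl]; rfl
  rw [hu, hu, pv_duplicados_eq, pv_duplicados_eq,
    pv_ofList_len, pv_ofList_len]
  simp only [List.length_map, List.length_nil]
  have h1 := List.toFinset_card_le (horario.map (fun e => (e.1, e.2.2.2)))
  have h2 := List.toFinset_card_le (horario.map (fun e => (e.1, e.2.1)))
  simp only [List.length_map] at h1 h2
  push_cast
  omega

-- ===== VERDICT (by name: the statement is the Claim_ definition above) =====
theorem contar_conflictos_spec : Claim_equal_contar_conflictos := by
  intro horario _
  exact contar_conflictos_spec' horario
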